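-- pv_equiv track=rewrite | github.com/intranautic/dsa | quick.py | srad
-- ===== SOURCE A (Python) =====
-- def srad(n, s):
--   for i in range(2, n):
--     d, m = divmod(n, i**s)
--     if not m:
--       p, q = srad(d, s)
--       return (p*i, q)
--   else:
--     return (1, n)
-- ===== SOURCE B (Python) =====
-- def srad(n, s):
--     # One iterative loop: trial divisor i never restarts (any j < i with j**s | n//i**s
--     # would already have divided n), and stops as soon as i**s exceeds n.
--     p, i = 1, 2
--     while i < n and i**s <= n:
--         d, m = divmod(n, i**s)
--         if not m:
--             p *= i
--             n = d
--         else: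
--             i += 1
--     return (p, n)
-- ===== Notes on version B (the rewrite author's own statement) =====
-- stated objective: faster
-- what changed: Replaces the recursion that rescans trial divisors from 2 after every successful division with a single iterative loop whose divisor i never restarts (any smaller s-th-power divisor of the quotient would already have divided n) and which stops as soon as i**s exceeds n instead of scanning all i up to n.
import Mathlib
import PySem

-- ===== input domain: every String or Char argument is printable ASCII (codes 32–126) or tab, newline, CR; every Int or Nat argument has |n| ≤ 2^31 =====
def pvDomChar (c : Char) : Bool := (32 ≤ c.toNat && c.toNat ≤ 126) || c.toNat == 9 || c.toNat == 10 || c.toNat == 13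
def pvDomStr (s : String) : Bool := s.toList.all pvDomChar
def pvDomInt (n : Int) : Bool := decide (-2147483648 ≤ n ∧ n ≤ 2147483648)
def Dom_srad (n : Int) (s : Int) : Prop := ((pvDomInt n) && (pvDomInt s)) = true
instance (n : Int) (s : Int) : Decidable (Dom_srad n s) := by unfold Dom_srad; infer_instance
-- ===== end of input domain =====

-- B replaces A's recursion (which rescans trial divisors from 2 after every successful
-- division) by one iterative loop that never restarts its divisor and stops once i**s > n.


-- ===== PORT A =====
-- A's 'for i in range(2, n): … return …  else: return (1, n)' loop body, with the
-- recursive call abstracted as 'recur' (the fuel-indexed sradF below supplies it).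
-- 'i**s' is ported as 'i ^ s.toNat': exact whenever the loop body runs under Pre_srad (s ≥ 1).
def sradScan (recur : Int → Int × Int) (n s : Int) : List Int → Int × Int
  | [] => (1, n)
  | i :: rest =>
    let ps := i ^ s.toNat
    let d := PySem.Int.floordiv n ps
    let m := PySem.Int.mod n ps
    if m = 0 then
      let pq := recur d
      (pq.1 * i, pq.2)
    else sradScan recur n s rest

-- Fuel-indexed transcription of A's recursion; under Pre_srad the quotient strictly
-- decreases, so fuel n.toNat + 1 is never exhausted.
def sradF : Nat → Int → Int → Int × Int
  | 0, n, _ => (1, n)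
  | f + 1, n, s => sradScan (fun d => sradF f d s) n s (PySem.List.pyRange 2 n 1)

def srad (n : Int) (s : Int) : Int × Int := sradF (n.toNat + 1) n s

-- ===== PORT B =====
-- B's while loop: state (p, i, n); fuel 2*n.toNat + 2 bounds the iteration count under
-- Pre_srad (each step either halves n at least or increments i below n).
def sradBF : Nat → Int → Int → Int → Int → Int × Int
  | 0, p, _, n, _ => (p, n)
  | f + 1, p, i, n, s =>
    if i < n ∧ i ^ s.toNat ≤ n then
      let ps := i ^ s.toNat
      if PySem.Int.mod n ps = 0 then
        sradBF f (p * i) i (PySem.Int.floordiv n ps) s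
      else
        sradBF f p (i + 1) n s
    else (p, n)

def srad_alt (n : Int) (s : Int) : Int × Int := sradBF (2 * n.toNat + 2) 1 2 n s

-- ===== PRECONDITION & SPEC =====
-- Pre_srad excludes s ≤ 0 with n ≥ 3, where Python A never returns: s = 0 gives infinite
-- recursion (RecursionError) and s < 0 makes i**s a float so the recursive call raises
-- TypeError in range(); for n ≤ 2 the loop body never runs and A returns (1, n) for any s.
def Pre_srad (n : Int) (s : Int) : Prop := 1 ≤ s ∨ n ≤ 2
instance (n : Int) (s : Int) : Decidable (Pre_srad n s) := by unfold Pre_srad; infer_instance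
def pvWitness_srad : Int × Int := (360, 2)

def Spec_srad (n : Int) (s : Int) (out : Int × Int) : Prop := out = srad_alt n s
instance (n : Int) (s : Int) (out : Int × Int) : Decidable (Spec_srad n s out) := by unfold Spec_srad; infer_instance

-- ===== CLAIM (what is proved, stated in full; the proofs are below) =====
def Claim_equal_srad : Prop := ∀ (n : Int) (s : Int), Dom_srad n s → Pre_srad n s → Spec_srad n s (srad n s)

-- ===== LEMMAS AND PROOFS =====

-- i^s.toNat ≥ 2 for a trial divisor
theorem pv_ps_two (s i : Int) (hs : 1 ≤ s) (hi : 2 ≤ i) : 2 ≤ i ^ s.toNat := by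
  calc (2 : Int) ≤ i := hi
    _ ≤ i ^ s.toNat := le_self_pow₀ (by omega) (by omega)

-- a positive n smaller than the power leaves a nonzero remainder
theorem pv_mod_small (n b : Int) (hn : 0 < n) (hb : n < b) : PySem.Int.mod n b ≠ 0 := by
  rw [PySem.Int.mod_eq_emod_of_pos (show (0:Int) < b by omega)]
  rw [Int.emod_eq_of_lt (by omega) hb]
  omega

-- exact division facts for the successful branch
theorem pv_div_facts (n ps : Int) (hn : 0 < n) (hps : 2 ≤ ps)
    (hm : PySem.Int.mod n ps = 0) :
    PySem.Int.floordiv n ps * ps = n ∧ 0 ≤ PySem.Int.floordiv n ps ∧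
    2 * PySem.Int.floordiv n ps ≤ n ∧ PySem.Int.floordiv n ps < n := by
  have hdvd : ps ∣ n := (PySem.Int.mod_eq_zero_iff_dvd n ps).mp hm
  rw [PySem.Int.floordiv_eq_ediv_of_pos (show (0:Int) < ps by omega)]
  have hmul : n / ps * ps = n := Int.ediv_mul_cancel hdvd
  have hd0 : 0 ≤ n / ps := Int.ediv_nonneg (by omega) (by omega)
  have h2 : 2 * (n / ps) ≤ n := by nlinarith [hmul, hd0]
  exact ⟨hmul, hd0, h2, by omega⟩

-- scanning a list of all-failing divisors yields (1, n)
theorem pv_scan_fail (r : Int → Int × Int) (n s : Int) (l : List Int)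
    (h : ∀ j ∈ l, PySem.Int.mod n (j ^ s.toNat) ≠ 0) :
    sradScan r n s l = (1, n) := by
  induction l with
  | nil => rfl
  | cons a t ih =>
    simp only [sradScan]
    rw [if_neg (h a (by simp))]
    exact ih (fun j hj => h j (by simp [hj]))

-- scanning an append whose first part all fails = scanning the second part
theorem pv_scan_append (r : Int → Int × Int) (n s : Int) (l1 l2 : List Int)
    (h : ∀ j ∈ l1, PySem.Int.mod n (j ^ s.toNat) ≠ 0) :
    sradScan r n s (l1 ++ l2) = sradScan r n s l2 := by
  induction l1 with
  | nil => rfl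
  | cons a t ih =>
    simp only [List.cons_append, sradScan]
    rw [if_neg (h a (by simp))]
    exact ih (fun j hj => h j (by simp [hj]))

-- Main loop invariant: B's loop from state (p, i, n), given that no divisor below i
-- works, computes p * (A's result on n).
theorem pv_main (fB : Nat) : ∀ (p i n s : Int) (fA : Nat), 1 ≤ s → 2 ≤ i →
    (∀ j : Int, 2 ≤ j → j < i → j < n → PySem.Int.mod n (j ^ s.toNat) ≠ 0) →
    2 * n.toNat + 2 ≤ i.toNat + fB → n.toNat < fA →
    sradBF fB p i n s = (p * (sradF fA n s).1, (sradF fA n s).2) := by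
  induction fB with
  | zero =>
    intro p i n s fA hs hi hno hfB hfA
    obtain ⟨g, rfl⟩ : ∃ g, fA = g + 1 := ⟨fA - 1, by omega⟩
    have hscan : sradScan (fun d => sradF g d s) n s (PySem.List.pyRange 2 n 1) = (1, n) := by
      apply pv_scan_fail
      intro j hj
      have hjr := (PySem.List.mem_pyRange_one).mp hj
      exact hno j hjr.1 (by omega) hjr.2
    simp only [sradBF, sradF, hscan, mul_one]
  | succ f ih =>
    intro p i n s fA hs hi hno hfB hfA
    obtain ⟨g, rfl⟩ : ∃ g, fA = g + 1 := ⟨fA - 1, by omega⟩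
    simp only [sradBF]
    by_cases hc : i < n ∧ i ^ s.toNat ≤ n
    · rw [if_pos hc]
      have hn : 0 < n := by omega
      have hpsi : 2 ≤ i ^ s.toNat := pv_ps_two s i hs hi
      by_cases hm : PySem.Int.mod n (i ^ s.toNat) = 0
      · rw [if_pos hm]
        obtain ⟨hmul, hd0, h2d, hdn⟩ := pv_div_facts n _ hn hpsi hm
        set d := PySem.Int.floordiv n (i ^ s.toNat) with hd
        -- A's scan: split range(2, n) at i; first part all fails, head of second succeeds
        have hsplit : PySem.List.pyRange 2 n 1
            = PySem.List.pyRange 2 i 1 ++ PySem.List.pyRange i n 1 :=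
          PySem.List.pyRange_one_append _ _ _ hi (by omega)
        have hcons : PySem.List.pyRange i n 1 = i :: PySem.List.pyRange (i + 1) n 1 :=
          PySem.List.pyRange_one_cons hc.1
        have hA : sradF (g + 1) n s = ((sradF g d s).1 * i, (sradF g d s).2) := by
          simp only [sradF]
          rw [hsplit, pv_scan_append _ _ _ _ _
            (fun j hj => by
              have hjr := (PySem.List.mem_pyRange_one).mp hj
              exact hno j hjr.1 hjr.2 (by omega))]
          rw [hcons]
          simp only [sradScan]
          rw [if_pos hm]
        rw [hA]
        have hIH := ih (p * i) i d s g hs hi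
          (fun j h2j hji hjd hmd => by
            have hdvd : (j ^ s.toNat) ∣ n := by
              have h1 : (j ^ s.toNat) ∣ d := (PySem.Int.mod_eq_zero_iff_dvd d _).mp hmd
              have h2 : d ∣ n := ⟨i ^ s.toNat, by linarith [hmul]⟩
              exact dvd_trans h1 h2
            exact hno j h2j hji (by omega) ((PySem.Int.mod_eq_zero_iff_dvd n _).mpr hdvd))
          (by omega) (by omega)
        rw [hIH]
        simp only [Prod.mk.injEq]
        exact ⟨by ring, trivial⟩
      · rw [if_neg hm]
        have hIH := ih p (i + 1) n s (g + 1) hs (by omega)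
          (fun j h2j hji hjn => by
            by_cases hji' : j < i
            · exact hno j h2j hji' hjn
            · have : j = i := by omega
              subst this; exact hm)
          (by omega) (by omega)
        exact hIH
    · rw [if_neg hc]
      -- loop exits: every remaining trial divisor j in [2, n) fails
      have hscan : sradScan (fun d => sradF g d s) n s (PySem.List.pyRange 2 n 1) = (1, n) := by
        apply pv_scan_fail
        intro j hj
        have hjr := (PySem.List.mem_pyRange_one).mp hj
        by_cases hji : j < i
        · exact hno j hjr.1 hji hjr.2
        · -- i ≤ j < n, so i < n; hence n < i^s ≤ j^s and the remainder is n ≠ 0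
          have hin : i < n := by omega
          have hps : n < i ^ s.toNat := by
            rcases not_and_or.mp hc with h | h
            · omega
            · omega
          have hmono : i ^ s.toNat ≤ j ^ s.toNat :=
            pow_le_pow_left₀ (by omega) (by omega) _
          exact pv_mod_small n (j ^ s.toNat) (by omega) (by omega)
      simp only [sradF, hscan, mul_one]

-- ===== VERDICT (by name: the statement is the Claim_ definition above) =====
theorem srad_spec : Claim_equal_srad := by
  intro n s _ hpre
  unfold Spec_srad srad srad_alt
  by_cases hs : 1 ≤ s
  · have h := pv_main (2 * n.toNat + 2) 1 2 n s (n.toNat + 1) hs (by norm_num)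
      (fun j h2j hji _ => by omega) (by omega) (by omega)
    rw [h, one_mul]
  · have hn : n ≤ 2 := by rcases hpre with h | h <;> omega
    simp only [sradBF, sradF, PySem.List.pyRange_one_eq_nil (show n ≤ (2:Int) by omega)]
    rw [if_neg (by omega)]
    rfl
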